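-- pv_equiv track=rewrite | github.com/diskria/spectrum | generate_manifest.py | sort_and_group_repositories
-- ===== SOURCE A (Python) =====
-- def sort_and_group_repositories(user_name, repositories):
--     grouped_repositories = {"personal": [], "user_dash": [], "organizations": []}
--
--     for repository in repositories:
--         full_name = repository["full_name"]
--         owner_name, _ = full_name.split("/")
--
--         if owner_name.lower() == user_name.lower():
--             grouped_repositories["personal"].append(repository)
--         elif owner_name.lower().startswith(user_name.lower() + "-"):
--             grouped_repositories["user_dash"].append(repository)
--         else:
--             grouped_repositories["organizations"].append(repository)
--
--     for key in grouped_repositories: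
--         grouped_repositories[key] = sorted(
--             grouped_repositories[key], key=lambda repo: repo["full_name"].lower()
--         )
--
--     return grouped_repositories
-- ===== SOURCE B (Python) =====
-- def _merge(left, right):
--     # stable merge of two key-sorted (key, repo) lists: take left on ties
--     out = []
--     push = out.append
--     i = j = 0
--     nl, nr = len(left), len(right)
--     while i < nl and j < nr:
--         a = left[i]
--         b = right[j]
--         if a[0] <= b[0]:
--             push(a); i += 1
--         else:
--             push(b); j += 1
--     return out + left[i:] + right[j:]
--
--
-- def _group_sorted(user, repos):
--     # divide and conquer: a single repo goes to its bucket as a (key, repo)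
--     # pair; halves are combined by merging the three buckets pairwise.
--     if not repos:
--         return [], [], []
--     if len(repos) == 1:
--         repo = repos[0]
--         full_name = repo["full_name"]
--         owner = full_name.split("/")[0].lower()
--         entry = [(full_name.lower(), repo)]
--         if owner == user:
--             return entry, [], []
--         if owner.startswith(user + "-"):
--             return [], entry, []
--         return [], [], entry
--     mid = (len(repos) + 1) // 2
--     p1, d1, o1 = _group_sorted(user, repos[:mid])
--     p2, d2, o2 = _group_sorted(user, repos[mid:])
--     return _merge(p1, p2), _merge(d1, d2), _merge(o1, o2)
--
--
-- def sort_and_group_repositories(user_name, repositories):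
--     personal, user_dash, organizations = _group_sorted(user_name.lower(), repositories)
--     return {
--         "personal": [repo for _, repo in personal],
--         "user_dash": [repo for _, repo in user_dash],
--         "organizations": [repo for _, repo in organizations],
--     }
-- ===== Notes on version B (the rewrite author's own statement) =====
-- stated objective: alternative
-- what changed: B replaces A's partition-into-buckets-then-builtin-sort-each-bucket by a divide-and-conquer recursion: the repository list is split in halves, a single repository is classified into one of three (key, repo) leaf buckets, and the three buckets are combined by a hand-written stable merge on the way up, so no sorted() call and no separate classification pass remain.
import Mathlib
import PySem

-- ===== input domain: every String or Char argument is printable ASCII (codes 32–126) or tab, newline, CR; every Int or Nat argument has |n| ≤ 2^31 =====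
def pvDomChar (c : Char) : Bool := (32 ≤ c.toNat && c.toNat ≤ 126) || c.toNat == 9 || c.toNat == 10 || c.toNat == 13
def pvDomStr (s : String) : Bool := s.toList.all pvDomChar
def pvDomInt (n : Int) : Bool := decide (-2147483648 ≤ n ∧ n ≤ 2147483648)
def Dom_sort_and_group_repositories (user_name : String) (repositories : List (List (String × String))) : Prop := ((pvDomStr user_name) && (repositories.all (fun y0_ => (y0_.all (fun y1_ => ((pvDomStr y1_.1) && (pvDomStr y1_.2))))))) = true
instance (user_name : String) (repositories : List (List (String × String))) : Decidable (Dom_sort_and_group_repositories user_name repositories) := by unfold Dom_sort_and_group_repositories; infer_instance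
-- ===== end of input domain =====

-- ===== PORT A =====
-- B replaces A's partition-then-builtin-sort by a divide-and-conquer recursion (classify single
-- repositories at the leaves, merge the three buckets on the way up); return values proved equal.

-- repo["full_name"] (assoc-list dict, first match; total form used under Pre_, which guarantees the key is present)
def pvFullName (r : List (String × String)) : String := (List.lookup "full_name" r).getD ""

-- the shared sort key: repo["full_name"].lower()
def pvKey (r : List (String × String)) : String := PySem.Str.lower (pvFullName r)

def sort_and_group_repositories (user_name : String) (repositories : List (List (String × String))) : List (String × List (List (String × String))) :=
  -- first loop: classify each repository into the three buckets, in order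
  let g := repositories.foldl
    (fun (acc : List (List (String × String)) × List (List (String × String)) × List (List (String × String))) repository =>
      let full_name := pvFullName repository
      let owner_name := (PySem.Chars.splitOn full_name.toList ['/']).headD []   -- full_name.split("/")[0]
      if PySem.Chars.lower owner_name == PySem.Chars.lower user_name.toList then
        (acc.1 ++ [repository], acc.2.1, acc.2.2)
      else if PySem.Chars.startswith (PySem.Chars.lower owner_name) (PySem.Chars.lower user_name.toList ++ ['-']) then
        (acc.1, acc.2.1 ++ [repository], acc.2.2)
      else
        (acc.1, acc.2.1, acc.2.2 ++ [repository]))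
    ([], [], [])
  -- second loop: sort each bucket by full_name.lower(), in key insertion order
  [("personal", PySem.List.sorted g.1 pvKey false),
   ("user_dash", PySem.List.sorted g.2.1 pvKey false),
   ("organizations", PySem.List.sorted g.2.2 pvKey false)]

-- ===== PORT B =====
-- _merge from Source B: stable merge of two key-sorted (key, repo) lists, taking left on ties
def pvMerge : List (String × List (String × String)) → List (String × List (String × String)) → List (String × List (String × String))
  | [], r => r
  | l, [] => l
  | a :: l, b :: r => if a.1 ≤ b.1 then a :: pvMerge l (b :: r) else b :: pvMerge (a :: l) r
termination_by l r => l.length + r.length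

-- _group_sorted from Source B: divide and conquer over the repository list
def pvGroupSorted (user : List Char) (repos : List (List (String × String))) :
    List (String × List (String × String)) × List (String × List (String × String)) × List (String × List (String × String)) :=
  match repos with
  | [] => ([], [], [])
  | [repo] =>
    let full_name := pvFullName repo
    let owner := PySem.Chars.lower ((PySem.Chars.splitOn full_name.toList ['/']).headD [])
    let entry := [(PySem.Str.lower full_name, repo)]
    if owner == user then (entry, [], [])
    else if PySem.Chars.startswith owner (user ++ ['-']) then ([], entry, [])
    else ([], [], entry)
  | a :: b :: t =>
    let mid := ((a :: b :: t).length + 1) / 2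
    let g1 := pvGroupSorted user ((a :: b :: t).take mid)
    let g2 := pvGroupSorted user ((a :: b :: t).drop mid)
    (pvMerge g1.1 g2.1, pvMerge g1.2.1 g2.2.1, pvMerge g1.2.2 g2.2.2)
termination_by repos.length
decreasing_by
  · simp [List.length_take]; omega
  · simp [List.length_drop]; omega

def sort_and_group_repositories_alt (user_name : String) (repositories : List (List (String × String))) : List (String × List (List (String × String))) :=
  let g := pvGroupSorted (PySem.Chars.lower user_name.toList) repositories
  [("personal", g.1.map (fun p => p.2)),
   ("user_dash", g.2.1.map (fun p => p.2)),
   ("organizations", g.2.2.map (fun p => p.2))]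

-- ===== PRECONDITION & SPEC =====
-- Pre_ excludes exactly the inputs where Python A raises: a repository without a "full_name"
-- key (KeyError) or whose full_name does not contain exactly one "/" (ValueError on unpacking).
def Pre_sort_and_group_repositories (user_name : String) (repositories : List (List (String × String))) : Prop :=
  (repositories.all (fun r =>
    match List.lookup "full_name" r with
    | some v => PySem.Str.count v "/" == 1
    | none => false)) = true
instance (user_name : String) (repositories : List (List (String × String))) : Decidable (Pre_sort_and_group_repositories user_name repositories) := by unfold Pre_sort_and_group_repositories; infer_instance

def pvWitness_sort_and_group_repositories : String × (List (List (String × String))) :=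
  ("u", [[("full_name", "U/spec")], [("full_name", "u-x/a")], [("full_name", "org/b")]])

def Spec_sort_and_group_repositories (user_name : String) (repositories : List (List (String × String))) (out : List (String × List (List (String × String)))) : Prop := out = sort_and_group_repositories_alt user_name repositories
instance (user_name : String) (repositories : List (List (String × String))) (out : List (String × List (List (String × String)))) : Decidable (Spec_sort_and_group_repositories user_name repositories out) := by unfold Spec_sort_and_group_repositories; infer_instance

-- ===== CLAIM (what is proved, stated in full; the proofs are below) =====
def Claim_equal_sort_and_group_repositories : Prop := ∀ (user_name : String) (repositories : List (List (String × String))), Dom_sort_and_group_repositories user_name repositories → Pre_sort_and_group_repositories user_name repositories → Spec_sort_and_group_repositories user_name repositories (sort_and_group_repositories user_name repositories)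

-- ===== LEMMAS AND PROOFS =====

-- insert-before-first-greater-or-equal (the stable "left" insertion; foldr of it is insertion sort)
def pvOrdIns {α κ : Type} [LinearOrder κ] (key : α → κ) (a : α) : List α → List α
  | [] => [a]
  | z :: t => if key a ≤ key z then a :: z :: t else z :: pvOrdIns key a t

def pvISort {α κ : Type} [LinearOrder κ] (key : α → κ) (xs : List α) : List α :=
  xs.foldr (pvOrdIns key) []

-- PySem's right-insertion (after equals) commutes with the left-insertion (before equals)
theorem pv_insB_ordIns {α κ : Type} [LinearOrder κ] (key : α → κ) (y a : α) :
    ∀ (l : List α),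
      PySem.List.insertBy (fun p q => decide (key p < key q)) y (pvOrdIns key a l) =
      pvOrdIns key a (PySem.List.insertBy (fun p q => decide (key p < key q)) y l) := by
  intro l
  induction l with
  | nil =>
    by_cases h : key y < key a
    · simp [pvOrdIns, PySem.List.insertBy, h, not_le.mpr h]
    · simp [pvOrdIns, PySem.List.insertBy, h, not_lt.mp h]
  | cons z t ih =>
    by_cases haz : key a ≤ key z
    · by_cases hyz : key y < key z
      · by_cases hya : key y < key a
        · simp [pvOrdIns, PySem.List.insertBy, haz, hyz, hya, not_le.mpr hya]
        · simp [pvOrdIns, PySem.List.insertBy, haz, hyz, hya, not_lt.mp hya]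
      · have hya : ¬ key y < key a := fun h => hyz (lt_of_lt_of_le h haz)
        simp [pvOrdIns, PySem.List.insertBy, haz, hyz, hya]
    · by_cases hyz : key y < key z
      · have hya : ¬ key a ≤ key y := not_le.mpr (lt_trans hyz (not_le.mp haz))
        simp [pvOrdIns, PySem.List.insertBy, haz, hyz, hya]
      · simp [pvOrdIns, PySem.List.insertBy, haz, hyz, ih]

-- the whole left fold of right-insertions commutes with one left-insertion
theorem pv_foldl_insB_ordIns {α κ : Type} [LinearOrder κ] (key : α → κ) (a : α) :
    ∀ (xs : List α) (acc : List α),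
      xs.foldl (fun acc x => PySem.List.insertBy (fun p q => decide (key p < key q)) x acc) (pvOrdIns key a acc) =
      pvOrdIns key a (xs.foldl (fun acc x => PySem.List.insertBy (fun p q => decide (key p < key q)) x acc) acc) := by
  intro xs
  induction xs with
  | nil => intro acc; rfl
  | cons x xs ih =>
    intro acc
    simp only [List.foldl_cons]
    rw [pv_insB_ordIns, ih]

-- PySem's stable sort IS the foldr of left-insertions
theorem pv_sorted_eq_iSort {α κ : Type} [LinearOrder κ] (key : α → κ) :
    ∀ (xs : List α), PySem.List.sorted xs key false = pvISort key xs := by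
  intro xs
  induction xs with
  | nil => rfl
  | cons x xs ih =>
    rw [PySem.List.sorted_eq_foldl_insertBy] at ih ⊢
    simp only [List.foldl_cons, pvISort, List.foldr_cons]
    have h0 : PySem.List.insertBy (fun p q => decide (key p < key q)) x ([] : List α) = pvOrdIns key x [] := rfl
    rw [h0, pv_foldl_insB_ordIns, ih]
    rfl

-- merging [a] into r is inserting a into r
theorem pv_merge_singleton (a : String × List (String × String)) :
    ∀ (r : List (String × List (String × String))), pvMerge [a] r = pvOrdIns (fun p => p.1) a r := by
  intro r
  induction r with
  | nil => simp [pvMerge, pvOrdIns]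
  | cons b r ih =>
    by_cases hab : a.1 ≤ b.1
    · simp [pvMerge, pvOrdIns, hab]
    · simp [pvMerge, pvOrdIns, hab, ih]

-- merge commutes with one left-insertion into its left argument
theorem pv_merge_ordIns (a : String × List (String × String)) :
    ∀ (l r : List (String × List (String × String))),
      pvMerge (pvOrdIns (fun p => p.1) a l) r = pvOrdIns (fun p => p.1) a (pvMerge l r) := by
  intro l
  induction l with
  | nil =>
    intro r
    have h1 : pvOrdIns (fun p : String × List (String × String) => p.1) a [] = [a] := rfl
    have h2 : pvMerge [] r = r := by cases r <;> simp [pvMerge]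
    rw [h1, h2, pv_merge_singleton]
  | cons z l ihl =>
    intro r
    induction r with
    | nil =>
      by_cases haz : a.1 ≤ z.1 <;> simp [pvOrdIns, pvMerge, haz]
    | cons b r ihr =>
      by_cases haz : a.1 ≤ z.1
      · by_cases hab : a.1 ≤ b.1
        · -- a goes first on the left; on the right a is inserted in front of merge (z::l) (b::r)
          have hhead : pvOrdIns (fun p : String × List (String × String) => p.1) a (pvMerge (z :: l) (b :: r)) =
              a :: pvMerge (z :: l) (b :: r) := by
            by_cases hzb : z.1 ≤ b.1 <;> simp [pvMerge, pvOrdIns, hzb, haz, hab]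
          simp only [pvOrdIns, haz, if_true]
          rw [hhead]
          simp [pvMerge, hab]
        · -- b < a ≤ z : b comes out first on both sides
          have hzb : ¬ z.1 ≤ b.1 := fun h => hab (le_trans haz h)
          simp only [pvOrdIns, haz, if_true] at ihr ⊢
          simp only [pvMerge, hab, if_false, hzb]
          rw [ihr]
          simp [pvOrdIns, hab]
      · by_cases hzb : z.1 ≤ b.1
        · -- z comes out first on both sides
          simp only [pvOrdIns, haz, if_false]
          simp only [pvMerge, hzb, if_true]
          rw [ihl (b :: r)]
          simp [pvOrdIns, haz]
        · -- b < z < a : b comes out first on both sides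
          have hab : ¬ a.1 ≤ b.1 := fun h => hzb (le_trans (le_of_lt (not_le.mp haz)) h)
          simp only [pvOrdIns, haz, if_false] at ihr ⊢
          simp only [pvMerge, hzb, if_false]
          rw [ihr]
          simp [pvOrdIns, hab]

-- merging two insertion-sorted lists is insertion-sorting the concatenation
theorem pv_merge_iSort :
    ∀ (l r : List (String × List (String × String))),
      pvMerge (pvISort (fun p => p.1) l) (pvISort (fun p => p.1) r) = pvISort (fun p => p.1) (l ++ r) := by
  intro l r
  induction l with
  | nil =>
    have h2 : ∀ (x : List (String × List (String × String))), pvMerge [] x = x := by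
      intro x; cases x <;> simp [pvMerge]
    simp [pvISort, h2]
  | cons x l ih =>
    simp only [pvISort, List.foldr_cons, List.cons_append]
    rw [pv_merge_ordIns]
    simp only [pvISort] at ih
    rw [ih]

-- decoration with the key
def pvDec (ys : List (List (String × String))) : List (String × List (String × String)) :=
  ys.map (fun r => (pvKey r, r))

-- insertion-sorting decorated lists by the first component = decorating the key-sorted list
theorem pv_iSort_dec (ys : List (List (String × String))) :
    pvISort (fun p => p.1) (pvDec ys) = pvDec (pvISort pvKey ys) := by
  induction ys with
  | nil => rfl
  | cons y ys ih =>
    simp only [pvDec, List.map_cons, pvISort, List.foldr_cons]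
    simp only [pvDec, pvISort] at ih
    rw [ih]
    generalize (List.foldr (pvOrdIns pvKey) [] ys) = zs
    induction zs with
    | nil => rfl
    | cons z zs ihz =>
      by_cases h : pvKey y ≤ pvKey z
      · simp [pvOrdIns, h]
      · simp only [pvOrdIns, List.map_cons, h, if_false]
        rw [ihz]

-- stripping the decoration off the sorted decorated list gives PySem's stable sort
theorem pv_chain (ys : List (List (String × String))) :
    (pvISort (fun p => p.1) (pvDec ys)).map (fun p => p.2) = PySem.List.sorted ys pvKey false := by
  rw [pv_iSort_dec, pv_sorted_eq_iSort]
  simp [pvDec, List.map_map, Function.comp_def]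

-- the classification conditions (identical tests in A and B)
def pvQ0 (user : List Char) (r : List (String × String)) : Bool :=
  PySem.Chars.lower ((PySem.Chars.splitOn (pvFullName r).toList ['/']).headD []) == user
def pvQ1 (user : List Char) (r : List (String × String)) : Bool :=
  PySem.Chars.startswith (PySem.Chars.lower ((PySem.Chars.splitOn (pvFullName r).toList ['/']).headD [])) (user ++ ['-'])

-- B's divide-and-conquer computes, per bucket, the insertion sort of the decorated filter
theorem pv_group_eq (user : List Char) :
    ∀ (n : Nat) (repos : List (List (String × String))), repos.length ≤ n →
      pvGroupSorted user repos =
        (pvISort (fun p => p.1) (pvDec (repos.filter (fun r => pvQ0 user r))),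
         pvISort (fun p => p.1) (pvDec (repos.filter (fun r => !pvQ0 user r && pvQ1 user r))),
         pvISort (fun p => p.1) (pvDec (repos.filter (fun r => !pvQ0 user r && !pvQ1 user r)))) := by
  intro n
  induction n with
  | zero =>
    intro repos h
    have : repos = [] := List.length_eq_zero_iff.mp (Nat.le_zero.mp h)
    subst this
    simp [pvGroupSorted, pvDec, pvISort]
  | succ n ih =>
    intro repos h
    match repos with
    | [] => simp [pvGroupSorted, pvDec, pvISort]
    | [repo] =>
      have e0 : (PySem.Chars.lower ((PySem.Chars.splitOn (pvFullName repo).toList ['/']).headD []) == user) = pvQ0 user repo := rfl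
      have e1 : PySem.Chars.startswith (PySem.Chars.lower ((PySem.Chars.splitOn (pvFullName repo).toList ['/']).headD [])) (user ++ ['-']) = pvQ1 user repo := rfl
      simp only [pvGroupSorted, e0, e1]
      by_cases h0 : pvQ0 user repo
      · simp [h0, pvDec, pvISort, pvOrdIns, pvKey]
      · by_cases h1 : pvQ1 user repo <;>
          simp [h0, h1, pvDec, pvISort, pvOrdIns, pvKey]
    | a :: b :: t =>
      have hlen : (a :: b :: t).length = t.length + 2 := by simp
      have hmid1 : ((a :: b :: t).take (((a :: b :: t).length + 1) / 2)).length ≤ n := by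
        simp [List.length_take]; omega
      have hmid2 : ((a :: b :: t).drop (((a :: b :: t).length + 1) / 2)).length ≤ n := by
        simp [List.length_drop]; omega
      simp only [pvGroupSorted]
      rw [ih _ hmid1, ih _ hmid2]
      have hsplit : ∀ (q : List (String × String) → Bool),
          pvMerge (pvISort (fun p => p.1) (pvDec (((a :: b :: t).take (((a :: b :: t).length + 1) / 2)).filter q)))
                  (pvISort (fun p => p.1) (pvDec (((a :: b :: t).drop (((a :: b :: t).length + 1) / 2)).filter q))) =
          pvISort (fun p => p.1) (pvDec ((a :: b :: t).filter q)) := by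
        intro q
        rw [pv_merge_iSort]
        congr 1
        rw [show pvDec (((a :: b :: t).take (((a :: b :: t).length + 1) / 2)).filter q) ++
              pvDec (((a :: b :: t).drop (((a :: b :: t).length + 1) / 2)).filter q) =
              pvDec ((((a :: b :: t).take (((a :: b :: t).length + 1) / 2)).filter q) ++
                     (((a :: b :: t).drop (((a :: b :: t).length + 1) / 2)).filter q)) from by
          simp [pvDec]]
        rw [← List.filter_append, List.take_append_drop]
      exact congrArg₂ Prod.mk (hsplit _) (congrArg₂ Prod.mk (hsplit _) (hsplit _))

-- A's classification fold computes the three filters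
def pvStep (user : List Char)
    (acc : List (List (String × String)) × List (List (String × String)) × List (List (String × String)))
    (r : List (String × String)) :
    List (List (String × String)) × List (List (String × String)) × List (List (String × String)) :=
  if pvQ0 user r then (acc.1 ++ [r], acc.2.1, acc.2.2)
  else if pvQ1 user r then (acc.1, acc.2.1 ++ [r], acc.2.2)
  else (acc.1, acc.2.1, acc.2.2 ++ [r])

theorem pv_foldA (user : List Char) :
    ∀ (xs : List (List (String × String)))
      (acc : List (List (String × String)) × List (List (String × String)) × List (List (String × String))),
      xs.foldl (pvStep user) acc =
      (acc.1 ++ xs.filter (fun r => pvQ0 user r),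
       acc.2.1 ++ xs.filter (fun r => !pvQ0 user r && pvQ1 user r),
       acc.2.2 ++ xs.filter (fun r => !pvQ0 user r && !pvQ1 user r)) := by
  intro xs
  induction xs with
  | nil => intro acc; simp
  | cons x xs ihx =>
    intro acc
    simp only [List.foldl_cons, List.filter_cons]
    rw [ihx]
    by_cases h0 : pvQ0 user x
    · simp [pvStep, h0]
    · by_cases h1 : pvQ1 user x <;> simp [pvStep, h0, h1]

theorem sort_and_group_repositories_eq (user_name : String) (repositories : List (List (String × String))) :
    sort_and_group_repositories user_name repositories = sort_and_group_repositories_alt user_name repositories := by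
  simp only [sort_and_group_repositories, sort_and_group_repositories_alt]
  have hstep : (fun (acc : List (List (String × String)) × List (List (String × String)) × List (List (String × String))) repository =>
      let full_name := pvFullName repository
      let owner_name := (PySem.Chars.splitOn full_name.toList ['/']).headD []
      if PySem.Chars.lower owner_name == PySem.Chars.lower user_name.toList then
        (acc.1 ++ [repository], acc.2.1, acc.2.2)
      else if PySem.Chars.startswith (PySem.Chars.lower owner_name) (PySem.Chars.lower user_name.toList ++ ['-']) then
        (acc.1, acc.2.1 ++ [repository], acc.2.2)
      else
        (acc.1, acc.2.1, acc.2.2 ++ [repository])) = pvStep (PySem.Chars.lower user_name.toList) := by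
    funext acc r
    simp only [pvStep, pvQ0, pvQ1]
    rfl
  rw [hstep,
      pv_foldA (PySem.Chars.lower user_name.toList) repositories ([], [], []),
      pv_group_eq (PySem.Chars.lower user_name.toList) repositories.length repositories le_rfl]
  simp [pv_chain]

-- ===== VERDICT (by name: the statement is the Claim_ definition above) =====
theorem sort_and_group_repositories_spec : Claim_equal_sort_and_group_repositories := by
  intro user_name repositories _ _
  unfold Spec_sort_and_group_repositories
  exact sort_and_group_repositories_eq user_name repositories
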